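-- pv_equiv track=rewrite | github.com/klaus-wq/cryptography-Part1 | Part1/gost.py | genKeys_GOST
-- ===== SOURCE A (Python) =====
-- def genKeys_GOST(key256b:str):
--     keys1 = key256b.encode()
--     keys = []
--     for i in range(8):
--         keys.append(keys1[:4])
--         keys1 = keys1[4:]
--     keysBin = []
--     for i in range(len(keys)):
--         binStr = ''
--         for j in keys[i]:
--             binStr += bin(j)[2:].zfill(8)
--         keysBin.append(binStr)
--     return keysBin
-- ===== SOURCE B (Python) =====
-- def genKeys_GOST(key256b: str):
--     full = ''.join(format(b, '08b') for b in key256b.encode())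
--     return [full[i * 32:(i + 1) * 32] for i in range(8)]
-- ===== Notes on version B (the rewrite author's own statement) =====
-- stated objective: simpler
-- what changed: Instead of chunking the bytes into eight 4-byte slices with a stateful loop and then converting each chunk byte-by-byte with an inner loop, B builds the whole 256-bit string in one flat encode pass and slices it at 32-bit offsets.
import Mathlib
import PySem

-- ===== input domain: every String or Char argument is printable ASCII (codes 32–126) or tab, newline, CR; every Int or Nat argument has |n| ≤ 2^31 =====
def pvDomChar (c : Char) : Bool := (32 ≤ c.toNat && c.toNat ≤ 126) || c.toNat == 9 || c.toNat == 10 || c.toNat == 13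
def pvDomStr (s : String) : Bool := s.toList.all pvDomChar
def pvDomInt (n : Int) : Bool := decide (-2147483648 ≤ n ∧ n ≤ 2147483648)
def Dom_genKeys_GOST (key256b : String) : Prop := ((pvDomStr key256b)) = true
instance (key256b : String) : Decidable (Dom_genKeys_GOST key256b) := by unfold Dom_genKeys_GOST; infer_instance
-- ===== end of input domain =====

-- B replaces A's stateful 4-byte chunking loop plus per-chunk inner conversion loop by one
-- flat bit-string build followed by 32-bit offset slicing (objective: simpler).
-- key256b.encode() is UTF-8; on the ASCII domain Dom_ this is exactly the char codes, so it
-- is ported as toList.map Char.toNat (exact on Dom_).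

-- bin(j)[2:].zfill(8) for a byte j ≥ 0; B's format(j, '08b') is the same value.
def bin8 (j : Nat) : List Char :=
  let cs := PySem.Int.toBinChars (j : Int)
  List.replicate (8 - cs.length) '0' ++ cs

-- ===== PORT A =====
def genKeys_GOST (key256b : String) : List String :=
  let keys1 := key256b.toList.map Char.toNat
  -- for i in range(8): keys.append(keys1[:4]); keys1 = keys1[4:]
  let st := (PySem.List.pyRange 0 8 1).foldl
    (fun (st : List (List Nat) × List Nat) _ =>
      (st.1 ++ [PySem.List.slice st.2 none (some 4)], PySem.List.slice st.2 (some 4) none))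
    ([], keys1)
  -- for i in range(len(keys)): binStr = ''; for j in keys[i]: binStr += bin(j)[2:].zfill(8)
  (PySem.List.pyRange 0 (PySem.List.len st.1) 1).foldl
    (fun acc i =>
      acc ++ [String.ofList ((PySem.List.pyGetD st.1 i []).foldl (fun s j => s ++ bin8 j) [])])
    []

-- ===== PORT B =====
def genKeys_GOST_alt (key256b : String) : List String :=
  -- full = ''.join(format(b, '08b') for b in key256b.encode())
  let full := (key256b.toList.map Char.toNat).flatMap bin8
  -- [full[i*32:(i+1)*32] for i in range(8)]
  (PySem.List.pyRange 0 8 1).map (fun i =>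
    String.ofList (PySem.List.slice full (some (i * 32)) (some ((i + 1) * 32))))

-- ===== PRECONDITION & SPEC =====
def Spec_genKeys_GOST (key256b : String) (out : List String) : Prop := out = genKeys_GOST_alt key256b
instance (key256b : String) (out : List String) : Decidable (Spec_genKeys_GOST key256b out) := by unfold Spec_genKeys_GOST; infer_instance

-- ===== CLAIM (what is proved, stated in full; the proofs are below) =====
def Claim_equal_genKeys_GOST : Prop := ∀ (key256b : String), Dom_genKeys_GOST key256b → Spec_genKeys_GOST key256b (genKeys_GOST key256b)

-- ===== LEMMAS AND PROOFS =====

set_option maxRecDepth 8192 in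
lemma toBinChars_len_le : ∀ n : Nat, n < 256 → (PySem.Int.toBinChars (n : Int)).length ≤ 8 := by
  decide

lemma bin8_len (j : Nat) (h : j < 256) : (bin8 j).length = 8 := by
  have := toBinChars_len_le j h
  simp [bin8]
  omega

lemma drop8_flatMap (bs : List Nat) (h : ∀ b ∈ bs, b < 256) (n : Nat) :
    (bs.flatMap bin8).drop (8 * n) = (bs.drop n).flatMap bin8 := by
  induction n generalizing bs with
  | zero => simp
  | succ n ih =>
    cases bs with
    | nil => simp
    | cons b t =>
      have hb : (bin8 b).length = 8 := bin8_len b (h b (by simp))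
      rw [List.flatMap_cons, show 8 * (n + 1) = (bin8 b).length + 8 * n by rw [hb]; ring,
        List.drop_length_add_append]
      simpa using ih t (fun x hx => h x (by simp [hx]))

lemma take8_flatMap (bs : List Nat) (h : ∀ b ∈ bs, b < 256) (k : Nat) :
    (bs.flatMap bin8).take (8 * k) = (bs.take k).flatMap bin8 := by
  induction k generalizing bs with
  | zero => simp
  | succ k ih =>
    cases bs with
    | nil => simp
    | cons b t =>
      have hb : (bin8 b).length = 8 := bin8_len b (h b (by simp))
      rw [List.flatMap_cons, show 8 * (k + 1) = (bin8 b).length + 8 * k by rw [hb]; ring,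
        List.take_length_add_append]
      simp [ih t (fun x hx => h x (by simp [hx]))]

lemma chunk_eq (bs : List Nat) (h : ∀ b ∈ bs, b < 256) (k : Nat) :
    (((List.map bin8 bs).drop (4 * k)).take 4).flatten
      = ((bs.flatMap bin8).drop (32 * k)).take 32 := by
  have h' : ∀ b ∈ (bs.drop (4 * k)), b < 256 := fun b hb => h b (List.mem_of_mem_drop hb)
  rw [← List.map_drop, ← List.map_take, ← List.flatMap_def,
    show 32 * k = 8 * (4 * k) by ring, drop8_flatMap bs h,
    show (32 : Nat) = 8 * 4 by norm_num, take8_flatMap _ h']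

-- ===== VERDICT (by name: the statement is the Claim_ definition above) =====
theorem genKeys_GOST_spec : Claim_equal_genKeys_GOST := by
  intro key hdom
  unfold Spec_genKeys_GOST genKeys_GOST genKeys_GOST_alt
  have hb : ∀ b ∈ key.toList.map Char.toNat, b < 256 := by
    intro b hbm
    obtain ⟨c, hc, rfl⟩ := List.mem_map.1 hbm
    have := List.all_eq_true.1 hdom c hc
    simp [pvDomChar] at this
    omega
  set bs := key.toList.map Char.toNat with hbs
  have hr : PySem.List.pyRange 0 8 1 = [0,1,2,3,4,5,6,7] := by decide
  simp only [hr, List.foldl, List.map, List.nil_append,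
    PySem.List.slice_to _ (by norm_num : (0:Int) ≤ (4:Int)),
    PySem.List.slice_from _ (by norm_num : (0:Int) ≤ (4:Int)),
    List.drop_drop]
  norm_num
  simp only [hr, List.map, List.flatten]
  norm_num [PySem.List.pyGetD_ofNat',
    show ((4:Int).toNat) = 4 from rfl,
    PySem.List.slice_to _ (by norm_num : (0:Int) ≤ (32:Int)),
    show ((32:Int).toNat) = 32 from rfl]
  refine ⟨?_, ?_, ?_, ?_, ?_, ?_, ?_, ?_⟩ <;>
    [have h0 := chunk_eq bs hb 0; have h0 := chunk_eq bs hb 1; have h0 := chunk_eq bs hb 2;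
     have h0 := chunk_eq bs hb 3; have h0 := chunk_eq bs hb 4; have h0 := chunk_eq bs hb 5;
     have h0 := chunk_eq bs hb 6; have h0 := chunk_eq bs hb 7] <;>
    · norm_num at h0
      rw [h0]
      try rw [PySem.List.slice_toNat (List.flatMap bin8 bs) (by norm_num) (by norm_num)]
      try norm_num [show ((32:Int).toNat) = 32 from rfl, show ((64:Int).toNat) = 64 from rfl,
        show ((96:Int).toNat) = 96 from rfl, show ((128:Int).toNat) = 128 from rfl,
        show ((160:Int).toNat) = 160 from rfl, show ((192:Int).toNat) = 192 from rfl,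
        show ((224:Int).toNat) = 224 from rfl, show ((256:Int).toNat) = 256 from rfl]
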